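-- pv_equiv track=rewrite | github.com/sunn-u/everyday-algorithm | programmers/lv1/pop_dolls.py | solution
-- ===== SOURCE A (Python) =====
-- def solution(board, moves):
--     answer = 0
--
--     pre_dolls = ['']
--     line_dict = {idx: 0 for idx in range(1, len(board)+1)}
--     for mov in moves:
--         which_line = line_dict[mov]
--         if which_line > len(board) - 1:
--             continue
--
--         mov -= 1
--         while board[which_line][mov] == 0:
--             which_line += 1
--         append_doll = board[which_line][mov]
--
--         if pre_dolls[-1] == append_doll:
--             pre_dolls.pop()
--             answer += 2
--         else:
--             pre_dolls.append(append_doll)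
--         line_dict[mov+1] = which_line + 1
--
--     return answer
-- ===== SOURCE B (Python) =====
-- def solution(board, moves):
--     n = len(board)
--     # per-column list of its dolls: non-zero entries of rows that reach this column, top row first
--     cols = [[row[c] for row in board if len(row) > c and row[c] != 0] for c in range(n)]
--     taken = {m: 0 for m in range(1, n + 1)}   # dolls already taken, per column number
--     answer = 0
--     picked = []
--     for m in moves:
--         k = taken[m]
--         col = cols[m - 1]
--         if k < len(col):
--             taken[m] = k + 1
--             d = col[k]
--             if picked and picked[-1] == d:
--                 picked.pop()
--                 answer += 2
--             else:
--                 picked.append(d)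
--     return answer
-- ===== Notes on version B (the rewrite author's own statement) =====
-- stated objective: simpler
-- what changed: A simulates the crane with a dict of cached row pointers and re-scans the board downward past zeros on every move; B precomputes each column's non-zero dolls once (top row first) and then just consumes them through a dict of per-column counters, skipping exhausted columns.
import Mathlib
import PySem

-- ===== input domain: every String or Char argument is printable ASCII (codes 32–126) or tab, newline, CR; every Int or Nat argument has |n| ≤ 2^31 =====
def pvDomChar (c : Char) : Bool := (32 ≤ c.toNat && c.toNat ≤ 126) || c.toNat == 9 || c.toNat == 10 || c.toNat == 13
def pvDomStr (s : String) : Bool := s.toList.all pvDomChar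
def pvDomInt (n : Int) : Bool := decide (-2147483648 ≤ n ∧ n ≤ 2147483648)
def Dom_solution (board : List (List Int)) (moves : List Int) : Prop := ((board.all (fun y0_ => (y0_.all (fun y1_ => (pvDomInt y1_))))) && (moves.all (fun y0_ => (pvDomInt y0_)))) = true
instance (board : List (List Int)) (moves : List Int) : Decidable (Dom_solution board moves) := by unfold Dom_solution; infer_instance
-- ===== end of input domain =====

-- B replaces A's cached-row-pointer dict and downward zero-rescans by precomputed per-column
-- doll lists consumed through per-column counters (simpler; same cost; neither version mutates its arguments).

-- ===== PORT A =====
-- the while-loop 'while board[which_line][mov] == 0: which_line += 1', walking the rows below index i;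
-- an exhausted rows list is Python's IndexError, excluded by Pre_
def pvWhileA (rows : List (List Int)) (c : Int) (i : Nat) : Nat :=
  match rows with
  | [] => i
  | row :: rest => if (PySem.List.pyGet? row c).getD 0 = 0 then pvWhileA rest c (i + 1) else i

-- one iteration of A's 'for mov in moves' loop; the doll stack is kept top-first
-- (Python appends/pops at the end), the bottom sentinel '' is modelled as 'none'
def pvStepA (board : List (List Int)) (st : Int × List (Option Int) × PySem.Dict Int Int)
    (mov : Int) : Int × List (Option Int) × PySem.Dict Int Int :=
  let answer := st.1
  let dolls := st.2.1
  let dict := st.2.2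
  let whichLine := dict.getD mov 0      -- line_dict[mov]; the key exists under Pre_ (KeyError excluded)
  if whichLine > (board.length : Int) - 1 then st
  else
    let c := mov - 1
    -- stored pointers are 0 or j+1, hence nonnegative: toNat is exact here
    let j := pvWhileA (board.drop whichLine.toNat) c whichLine.toNat
    let d := (PySem.List.pyGet? (board.getD j []) c).getD 0   -- board[which_line][mov]; in range under Pre_
    let dict' := dict.insert mov ((j : Int) + 1)
    match dolls with
    | t :: rest => if t = some d then (answer + 2, rest, dict') else (answer, some d :: dolls, dict')
    | [] => (answer, [some d], dict')   -- unreachable: the sentinel is never popped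
def solution (board : List (List Int)) (moves : List Int) : Int :=
  let dict0 := (PySem.List.pyRange 1 ((board.length : Int) + 1) 1).foldl
      (fun d k => d.insert k 0) (PySem.Dict.empty)
  (moves.foldl (pvStepA board) (0, [(none : Option Int)], dict0)).1

-- ===== PORT B =====
-- column c of the board read top to bottom ('[row[c] for row in board]'); rows have length
-- len(board) under Pre_, so getD is exact there
def pvCol (board : List (List Int)) (c : Nat) : List Int :=
  board.map (fun row => row.getD c 0)

-- cols = [[row[c] for row in board if len(row) > c and row[c] != 0] for c in range(n)];
-- the row[c] read is guarded by len(row) > c, so getD is exact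
def pvColsB (board : List (List Int)) : List (List Int) :=
  (List.range board.length).map (fun c =>
    ((board.filter (fun row => decide (c < row.length))).map (fun row => row.getD c 0)).filter
      (fun v => v ≠ 0))

-- one iteration of B's loop; 'picked' is kept top-first, 'taken' is the dict of per-column
-- counters (taken[m] raises KeyError on a move outside 1..n, excluded by Pre_)
def pvStepB (cols : List (List Int)) (st : Int × List Int × PySem.Dict Int Int) (m : Int) :
    Int × List Int × PySem.Dict Int Int :=
  let answer := st.1
  let picked := st.2.1
  let taken := st.2.2
  let k := taken.getD m 0                         -- taken[m]; the key exists under Pre_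
  let col := PySem.List.pyGetD cols (m - 1) []    -- cols[m - 1]; in range whenever taken[m] exists
  if k < (col.length : Int) then
    let taken' := taken.insert m (k + 1)
    let d := col.getD k.toNat 0   -- stored counters are 0 or k+1, hence nonnegative: toNat is exact
    match picked with
    | t :: rest => if t = d then (answer + 2, rest, taken') else (answer, d :: picked, taken')
    | [] => (answer, [d], taken')
  else st
def solution_alt (board : List (List Int)) (moves : List Int) : Int :=
  let taken0 := (PySem.List.pyRange 1 ((board.length : Int) + 1) 1).foldl
      (fun d k => d.insert k 0) (PySem.Dict.empty)
  (moves.foldl (pvStepB (pvColsB board)) (0, ([] : List Int), taken0)).1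

-- ===== PRECONDITION & SPEC =====
-- Pre_ is exactly A's returning domain: every move names an existing column (else KeyError), and
-- a column is never drawn from more often than it has dolls reachable before a too-short row
-- unless the column is full-length with a doll on the bottom row (else the scan raises IndexError).
def Pre_solution (board : List (List Int)) (moves : List Int) : Prop :=
  (∀ m ∈ moves, 1 ≤ m ∧ m ≤ (board.length : Int)) ∧
  (∀ c ∈ List.range board.length,
    moves.count ((c : Int) + 1)
        ≤ (((board.takeWhile (fun row => decide (c < row.length))).map
              (fun row => row.getD c 0)).filter (fun v => v ≠ 0)).length
      ∨ ((∀ row ∈ board, c < row.length)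
          ∧ (pvCol board c).getD (board.length - 1) 0 ≠ 0))
instance (board : List (List Int)) (moves : List Int) : Decidable (Pre_solution board moves) := by
  unfold Pre_solution; infer_instance
def pvWitness_solution : List (List Int) × List Int := ([[1, 0], [2, 2]], [1, 2, 2, 1])
def Spec_solution (board : List (List Int)) (moves : List Int) (out : Int) : Prop :=
  out = solution_alt board moves
instance (board : List (List Int)) (moves : List Int) (out : Int) :
    Decidable (Spec_solution board moves out) := by unfold Spec_solution; infer_instance

-- ===== CLAIM (what is proved, stated in full; the proofs are below) =====
def Claim_equal_solution : Prop := ∀ (board : List (List Int)) (moves : List Int),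
  Dom_solution board moves → Pre_solution board moves →
  Spec_solution board moves (solution board moves)

-- ===== LEMMAS AND PROOFS =====

-- offset of the first non-zero entry (length if none): what A's while-loop adds to the pointer
def pvFnz : List Int → Nat
  | [] => 0
  | v :: r => if v = 0 then pvFnz r + 1 else 0

-- the pointer A's dict caches for a column after k dolls have been taken from it
def pvPtr : List Int → Nat → Nat
  | _, 0 => 0
  | [], _ + 1 => 0
  | v :: r, k + 1 => if v = 0 then pvPtr r (k + 1) + 1 else pvPtr r k + 1

theorem pvPtr_zero (l : List Int) : pvPtr l 0 = 0 := by cases l <;> rfl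

theorem pvPtr_cons_succ (v : Int) (r : List Int) (k : Nat) :
    pvPtr (v :: r) (k + 1) = if v = 0 then pvPtr r (k + 1) + 1 else pvPtr r k + 1 := rfl

theorem pvFnz_cons (v : Int) (r : List Int) :
    pvFnz (v :: r) = if v = 0 then pvFnz r + 1 else 0 := rfl

theorem pvWhileA_eq (rows : List (List Int)) (c : Int) (i : Nat) :
    pvWhileA rows c i = i + pvFnz (rows.map (fun row => (PySem.List.pyGet? row c).getD 0)) := by
  induction rows generalizing i with
  | nil => simp [pvWhileA, pvFnz]
  | cons row rest ih =>
    by_cases h : (PySem.List.pyGet? row c).getD 0 = 0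
    · simp [pvWhileA, pvFnz, h, ih]; omega
    · simp [pvWhileA, pvFnz, h]

theorem pvScan (col : List Int) (k : Nat)
    (hk : k < ((col.filter (fun v => v ≠ 0)).length)) :
    pvPtr col k + pvFnz (col.drop (pvPtr col k)) < col.length ∧
    col.getD (pvPtr col k + pvFnz (col.drop (pvPtr col k))) 0
      = (col.filter (fun v => v ≠ 0)).getD k 0 ∧
    pvPtr col (k + 1) = pvPtr col k + pvFnz (col.drop (pvPtr col k)) + 1 := by
  induction col generalizing k with
  | nil => simp at hk
  | cons v r ih =>
    by_cases hv : v = 0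
    · subst hv
      have hfil : ((0 : Int) :: r).filter (fun v => v ≠ 0) = r.filter (fun v => v ≠ 0) := by
        simp
      rw [hfil] at hk
      cases k with
      | zero =>
        obtain ⟨i1, i2, i3⟩ := ih 0 hk
        simp only [pvPtr_zero, List.drop_zero, Nat.zero_add] at i1 i2 i3 ⊢
        rw [hfil]
        have e1 : pvFnz ((0 : Int) :: r) = pvFnz r + 1 := by simp [pvFnz_cons]
        have e2 : pvPtr ((0 : Int) :: r) 1 = pvPtr r 1 + 1 := by simp [pvPtr_cons_succ]
        rw [e1, e2]
        refine ⟨by simp; omega, ?_, by omega⟩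
        rw [List.getD_cons_succ]
        exact i2
      | succ k =>
        obtain ⟨i1, i2, i3⟩ := ih (k + 1) hk
        have e1 : pvPtr ((0 : Int) :: r) (k + 1) = pvPtr r (k + 1) + 1 := by
          simp [pvPtr_cons_succ]
        have e2 : pvPtr ((0 : Int) :: r) (k + 1 + 1) = pvPtr r (k + 1 + 1) + 1 := by
          simp [pvPtr_cons_succ]
        rw [hfil, e1, e2]
        simp only [List.drop_succ_cons]
        refine ⟨by simp; omega, ?_, by omega⟩
        have e3 : pvPtr r (k + 1) + 1 + pvFnz (r.drop (pvPtr r (k + 1)))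
            = (pvPtr r (k + 1) + pvFnz (r.drop (pvPtr r (k + 1)))) + 1 := by omega
        rw [e3, List.getD_cons_succ]
        exact i2
    · have hfil : (v :: r).filter (fun v => v ≠ 0) = v :: r.filter (fun v => v ≠ 0) := by
        simp [hv]
      cases k with
      | zero =>
        have e1 : pvPtr (v :: r) 1 = pvPtr r 0 + 1 := by simp [pvPtr_cons_succ, hv]
        simp only [pvPtr_zero, List.drop_zero, Nat.zero_add, e1, hfil]
        have e2 : pvFnz (v :: r) = 0 := by simp [pvFnz_cons, hv]
        rw [e2]
        refine ⟨by simp, by simp, by simp⟩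
      | succ k =>
        rw [hfil] at hk
        have hk' : k < (r.filter (fun v => v ≠ 0)).length := by simpa using hk
        obtain ⟨i1, i2, i3⟩ := ih k hk'
        have e1 : pvPtr (v :: r) (k + 1) = pvPtr r k + 1 := by simp [pvPtr_cons_succ, hv]
        have e2 : pvPtr (v :: r) (k + 1 + 1) = pvPtr r (k + 1) + 1 := by
          simp [pvPtr_cons_succ, hv]
        rw [hfil, e1, e2]
        simp only [List.drop_succ_cons]
        refine ⟨by simp; omega, ?_, by omega⟩
        have e3 : pvPtr r k + 1 + pvFnz (r.drop (pvPtr r k))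
            = (pvPtr r k + pvFnz (r.drop (pvPtr r k))) + 1 := by omega
        rw [e3, List.getD_cons_succ]
        simpa using i2

theorem pvDone (col : List Int) (hne : col ≠ [])
    (hb : col.getD (col.length - 1) 0 ≠ 0) :
    pvPtr col ((col.filter (fun v => v ≠ 0)).length) = col.length := by
  induction col with
  | nil => exact absurd rfl hne
  | cons v r ih =>
    cases r with
    | nil =>
      have hv : v ≠ 0 := by simpa using hb
      simp [hv, pvPtr_cons_succ, pvPtr_zero]
    | cons w t =>
      have hb' : (w :: t).getD ((w :: t).length - 1) 0 ≠ 0 := by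
        simpa [List.getD_cons_succ] using hb
      have ihr := ih (by simp) hb'
      by_cases hv : v = 0
      · subst hv
        have hf : ((0 : Int) :: w :: t).filter (fun v => v ≠ 0)
            = (w :: t).filter (fun v => v ≠ 0) := by simp
        rw [hf]
        cases hfl : ((w :: t).filter (fun v => v ≠ 0)).length with
        | zero =>
          exfalso
          have hz := List.length_eq_zero_iff.mp hfl
          have hall : ∀ a ∈ (w :: t), a = 0 := by
            intro a ha
            by_contra hne'
            have hmem : a ∈ (w :: t).filter (fun v => v ≠ 0) :=
              List.mem_filter.mpr ⟨ha, by simpa using hne'⟩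
            rw [hz] at hmem
            simp at hmem
          apply hb'
          have hlt : (w :: t).length - 1 < (w :: t).length := by simp
          rw [List.getD_eq_getElem _ _ hlt]
          exact hall _ (List.getElem_mem hlt)
        | succ k =>
          have : pvPtr ((0 : Int) :: w :: t) (k + 1) = pvPtr (w :: t) (k + 1) + 1 := by
            simp [pvPtr_cons_succ]
          rw [this, ← hfl, ihr]
          simp
      · have hf : (v :: w :: t).filter (fun v => v ≠ 0)
            = v :: (w :: t).filter (fun v => v ≠ 0) := by simp [List.filter_cons, hv]
        rw [hf]
        have : pvPtr (v :: w :: t) (((w :: t).filter (fun v => v ≠ 0)).length + 1)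
            = pvPtr (w :: t) (((w :: t).filter (fun v => v ≠ 0)).length) + 1 := by
          simp [pvPtr_cons_succ, hv]
        rw [List.length_cons, this, ihr]
        simp

theorem pvInitDict (l : List Int) (d : PySem.Dict Int Int)
    (h : ∀ k, d.getD k 0 = 0) (k : Int) :
    (l.foldl (fun d k => d.insert k 0) d).getD k 0 = 0 := by
  induction l generalizing d with
  | nil => exact h k
  | cons a l ih =>
    refine ih (d.insert a 0) (fun k' => ?_)
    rw [PySem.Dict.getD_insert]
    split
    · rfl
    · exact h k'

theorem pvColB_eq (board : List (List Int)) (c : Nat) :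
    ((board.filter (fun row => decide (c < row.length))).map (fun row => row.getD c 0)).filter
        (fun v => v ≠ 0)
      = (pvCol board c).filter (fun v => v ≠ 0) := by
  induction board with
  | nil => rfl
  | cons row rest ih =>
    by_cases h : c < row.length
    · simp [pvCol, List.filter_cons, h] at ih ⊢
      split <;> simp [ih]
    · simp [pvCol, h] at ih ⊢
      exact ih

theorem pvColsB_getD (board : List (List Int)) (c : Nat) (hc : c < board.length) :
    (pvColsB board).getD c [] = (pvCol board c).filter (fun v => v ≠ 0) := by
  rw [← pvColB_eq]
  simp [pvColsB, List.getD_eq_getElem?_getD, hc]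

theorem pvZ_le (board : List (List Int)) (c : Nat) :
    (((board.takeWhile (fun row => decide (c < row.length))).map
        (fun row => row.getD c 0)).filter (fun v => v ≠ 0)).length
      ≤ ((pvCol board c).filter (fun v => v ≠ 0)).length := by
  conv_rhs => rw [pvCol, ← List.takeWhile_append_dropWhile
    (p := fun row => decide (c < row.length)) (l := board)]
  rw [List.map_append, List.filter_append, List.length_append]
  exact Nat.le_add_right _ _

theorem pvBridge (board : List (List Int)) (c : Nat) (p : Nat) :
    (board.drop p).map (fun row => (PySem.List.pyGet? row ((c : Int))).getD 0)
      = (pvCol board c).drop p := by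
  rw [pvCol, List.map_drop]
  simp [List.getD_eq_getElem?_getD]

theorem pvColGetD (board : List (List Int)) (c : Nat) (j : Nat) (hj : j < board.length) :
    (pvCol board c).getD j 0 = (board.getD j []).getD c 0 := by
  rw [pvCol, List.getD_eq_getElem _ _ (by simpa using hj), List.getElem_map,
    List.getD_eq_getElem _ _ hj]

theorem pvMain (board : List (List Int)) (rest : List Int)
    (ansA ansB : Int) (picked : List Int) (dolls : List (Option Int))
    (dict taken : PySem.Dict Int Int)
    (hmv : ∀ m ∈ rest, 1 ≤ m ∧ m ≤ (board.length : Int))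
    (hdolls : dolls = picked.map some ++ [none])
    (hinv : ∀ c, c < board.length → ∃ k : Nat,
      taken.getD ((c : Int) + 1) 0 = (k : Int) ∧
      dict.getD ((c : Int) + 1) 0 = (pvPtr (pvCol board c) k : Int) ∧
      k ≤ ((pvCol board c).filter (fun v => v ≠ 0)).length ∧
      (k + rest.count ((c : Int) + 1) ≤ ((pvCol board c).filter (fun v => v ≠ 0)).length
        ∨ (pvCol board c).getD (board.length - 1) 0 ≠ 0))
    (hans : ansA = ansB) :
    (rest.foldl (pvStepA board) (ansA, dolls, dict)).1
      = (rest.foldl (pvStepB (pvColsB board)) (ansB, picked, taken)).1 := by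
  induction rest generalizing ansA ansB picked dolls dict taken with
  | nil => simpa using hans
  | cons m rest ih =>
    obtain ⟨hm1, hm2⟩ := hmv m (by simp)
    have hn : 0 < board.length := by omega
    have hcm : (((m - 1).toNat : Int)) = m - 1 := Int.toNat_of_nonneg (by omega)
    set c := (m - 1).toNat with hc
    have hceq : ((c : Int)) + 1 = m := by omega
    have hm1c : m - 1 = ((c : Int)) := by omega
    have hcn : c < board.length := by omega
    have hcl : (pvCol board c).length = board.length := by simp [pvCol]
    have hnzB : (pvColsB board).getD c [] = (pvCol board c).filter (fun v => v ≠ 0) :=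
      pvColsB_getD board c hcn
    have hmv' : ∀ m' ∈ rest, 1 ≤ m' ∧ m' ≤ (board.length : Int) :=
      fun m' hm' => hmv m' (by simp [hm'])
    obtain ⟨k0, hpk, hdk, hbk, hsk⟩ := hinv c hcn
    have hpkm : taken.getD m 0 = (k0 : Int) := by rw [← hceq]; exact hpk
    have hdc : dict.getD m 0 = (pvPtr (pvCol board c) k0 : Int) := by rw [← hceq]; exact hdk
    simp only [List.foldl_cons]
    by_cases hcase : k0 < ((pvCol board c).filter (fun v => v ≠ 0)).length
    · -- the column still holds a doll: both sides pick it
      obtain ⟨s1, s2, s3⟩ := pvScan (pvCol board c) k0 hcase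
      set p := pvPtr (pvCol board c) k0 with hpdef
      set f := pvFnz ((pvCol board c).drop p) with hfdef
      set dd := ((pvCol board c).filter (fun v => v ≠ 0)).getD k0 0 with hddef
      have s1' : p + f < board.length := by rw [← hcl]; exact s1
      have hguard : ¬ (dict.getD m 0 > (board.length : Int) - 1) := by rw [hdc]; omega
      have htn : (dict.getD m 0).toNat = p := by rw [hdc]; exact Int.toNat_natCast _
      have hwhile : pvWhileA (board.drop p) (m - 1) p = p + f := by
        rw [← hcm, pvWhileA_eq, pvBridge]
      have hd : (PySem.List.pyGet? (board.getD (p + f) []) (m - 1)).getD 0 = dd := by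
        rw [← hcm, ← s2, pvColGetD board c _ s1']
        simp [PySem.List.pyGet?_natCast, List.getD_eq_getElem?_getD]
      have hinv' : ∀ c', c' < board.length → ∃ k : Nat,
          (taken.insert m ((k0 : Int) + 1)).getD ((c' : Int) + 1) 0 = (k : Int) ∧
          (dict.insert m (((p + f : Nat) : Int) + 1)).getD ((c' : Int) + 1) 0
            = (pvPtr (pvCol board c') k : Int) ∧
          k ≤ ((pvCol board c').filter (fun v => v ≠ 0)).length ∧
          (k + rest.count ((c' : Int) + 1) ≤ ((pvCol board c').filter (fun v => v ≠ 0)).length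
            ∨ (pvCol board c').getD (board.length - 1) 0 ≠ 0) := by
        intro c' hc'
        by_cases h : c' = c
        · subst h
          refine ⟨k0 + 1, ?_, ?_, by omega, ?_⟩
          · rw [PySem.Dict.getD_insert, if_pos hceq]
            push_cast
            ring
          · rw [PySem.Dict.getD_insert, if_pos hceq, s3]
            push_cast
            ring
          · rcases hsk with hs | hs
            · left
              have hcc : (m :: rest).count ((c : Int) + 1)
                  = rest.count ((c : Int) + 1) + 1 := by
                rw [hceq]; simp
              omega
            · right; exact hs
        · obtain ⟨k', a1, a2, a3, a4⟩ := hinv c' hc'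
          have hne : ((c' : Int) + 1) ≠ m := by omega
          refine ⟨k', ?_, ?_, a3, ?_⟩
          · rw [PySem.Dict.getD_insert, if_neg hne]; exact a1
          · rw [PySem.Dict.getD_insert, if_neg hne]; exact a2
          · rcases a4 with hs | hs
            · left
              have : rest.count ((c' : Int) + 1) ≤ (m :: rest).count ((c' : Int) + 1) := by
                simp [List.count_cons]
              omega
            · right; exact hs
      have hltB : taken.getD m 0
          < ((((pvColsB board).getD c []) : List Int).length : Int) := by
        rw [hpkm, hnzB]
        exact_mod_cast hcase
      cases picked with
      | nil =>
        subst hdolls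
        simp only [List.map_nil, List.nil_append]
        have eA : pvStepA board (ansA, [(none : Option Int)], dict) m
            = (ansA, [some dd, (none : Option Int)], dict.insert m (((p + f : Nat) : Int) + 1)) := by
          simp only [pvStepA]
          rw [if_neg hguard]
          simp only [htn, hwhile, hd]
          simp
        have eB : pvStepB (pvColsB board) (ansB, ([] : List Int), taken) m
            = (ansB, [dd], taken.insert m ((k0 : Int) + 1)) := by
          simp only [pvStepB]
          rw [hm1c]
          simp only [PySem.List.pyGetD_natCast]
          rw [if_pos hltB, hpkm]
          simp only [Int.toNat_natCast]
          rw [hnzB]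
        rw [eA, eB]
        exact ih ansA ansB [dd] [some dd, none] _ _ hmv' (by simp) hinv' hans
      | cons q qs =>
        subst hdolls
        simp only [List.map_cons, List.cons_append]
        by_cases hq : q = dd
        · have eA : pvStepA board (ansA, some q :: (qs.map some ++ [none]), dict) m
              = (ansA + 2, qs.map some ++ [none], dict.insert m (((p + f : Nat) : Int) + 1)) := by
            simp only [pvStepA]
            rw [if_neg hguard]
            simp only [htn, hwhile, hd]
            simp [hq]
          have eB : pvStepB (pvColsB board) (ansB, q :: qs, taken) m
              = (ansB + 2, qs, taken.insert m ((k0 : Int) + 1)) := by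
            simp only [pvStepB]
            rw [hm1c]
            simp only [PySem.List.pyGetD_natCast]
            rw [if_pos hltB, hpkm]
            simp only [Int.toNat_natCast]
            rw [hnzB]
            show (if q = dd then (ansB + 2, qs, taken.insert m ((k0 : Int) + 1))
                else (ansB, dd :: q :: qs, taken.insert m ((k0 : Int) + 1))) = _
            rw [if_pos hq]
          rw [eA, eB]
          exact ih _ _ qs _ _ _ hmv' rfl hinv' (by omega)
        · have eA : pvStepA board (ansA, some q :: (qs.map some ++ [none]), dict) m
              = (ansA, some dd :: (some q :: (qs.map some ++ [none])),
                  dict.insert m (((p + f : Nat) : Int) + 1)) := by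
            simp only [pvStepA]
            rw [if_neg hguard]
            simp only [htn, hwhile, hd]
            simp [hq]
          have eB : pvStepB (pvColsB board) (ansB, q :: qs, taken) m
              = (ansB, dd :: q :: qs, taken.insert m ((k0 : Int) + 1)) := by
            simp only [pvStepB]
            rw [hm1c]
            simp only [PySem.List.pyGetD_natCast]
            rw [if_pos hltB, hpkm]
            simp only [Int.toNat_natCast]
            rw [hnzB]
            show (if q = dd then (ansB + 2, qs, taken.insert m ((k0 : Int) + 1))
                else (ansB, dd :: q :: qs, taken.insert m ((k0 : Int) + 1))) = _
            rw [if_neg hq]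
          rw [eA, eB]
          exact ih _ _ (dd :: q :: qs) _ _ _ hmv' (by simp) hinv' hans
    · -- the column is exhausted: both sides skip the move
      have hk : k0 = ((pvCol board c).filter (fun v => v ≠ 0)).length :=
        le_antisymm hbk (not_lt.mp hcase)
      have hbot : (pvCol board c).getD (board.length - 1) 0 ≠ 0 := by
        rcases hsk with hs | hs
        · exfalso
          have hcc : (m :: rest).count ((c : Int) + 1) = rest.count ((c : Int) + 1) + 1 := by
            rw [hceq]; simp
          omega
        · exact hs
      have hcne : pvCol board c ≠ [] := by
        intro h
        rw [h] at hcl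
        simp at hcl
        omega
      have hdone : pvPtr (pvCol board c) (((pvCol board c).filter (fun v => v ≠ 0)).length)
          = board.length := by
        rw [← hcl]
        exact pvDone (pvCol board c) hcne (by rw [hcl]; exact hbot)
      have hguard : dict.getD m 0 > (board.length : Int) - 1 := by
        rw [hdc, hk, hdone]; omega
      have eA : pvStepA board (ansA, dolls, dict) m = (ansA, dolls, dict) := by
        simp only [pvStepA]
        rw [if_pos hguard]
      have eB : pvStepB (pvColsB board) (ansB, picked, taken) m = (ansB, picked, taken) := by
        simp only [pvStepB]
        rw [hm1c]
        simp only [PySem.List.pyGetD_natCast]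
        have hnltB : ¬ (taken.getD m 0 < ((((pvColsB board).getD c []) : List Int).length : Int)) := by
          rw [hpkm, hnzB]
          exact_mod_cast not_lt.mpr (le_of_eq hk.symm)
        rw [if_neg hnltB]
      rw [eA, eB]
      have hinv' : ∀ c', c' < board.length → ∃ k : Nat,
          taken.getD ((c' : Int) + 1) 0 = (k : Int) ∧
          dict.getD ((c' : Int) + 1) 0 = (pvPtr (pvCol board c') k : Int) ∧
          k ≤ ((pvCol board c').filter (fun v => v ≠ 0)).length ∧
          (k + rest.count ((c' : Int) + 1) ≤ ((pvCol board c').filter (fun v => v ≠ 0)).length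
            ∨ (pvCol board c').getD (board.length - 1) 0 ≠ 0) := by
        intro c' hc'
        obtain ⟨k', a1, a2, a3, a4⟩ := hinv c' hc'
        refine ⟨k', a1, a2, a3, ?_⟩
        rcases a4 with hs | hs
        · left
          have : rest.count ((c' : Int) + 1) ≤ (m :: rest).count ((c' : Int) + 1) := by
            simp [List.count_cons]
          omega
        · right; exact hs
      exact ih _ _ picked _ _ _ hmv' hdolls hinv' hans

-- ===== VERDICT (by name: the statement is the Claim_ definition above) =====
theorem solution_spec : Claim_equal_solution := by
  intro board moves _ hpre
  obtain ⟨hmv, hsafe⟩ := hpre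
  show solution board moves = solution_alt board moves
  simp only [solution, solution_alt]
  refine pvMain board moves 0 0 [] [(none : Option Int)] _ _ hmv (by simp) ?_ rfl
  intro c hc
  refine ⟨0, ?_, ?_, Nat.zero_le _, ?_⟩
  · rw [pvInitDict _ _ (fun k => PySem.Dict.getD_empty k 0)]
    rfl
  · rw [pvInitDict _ _ (fun k => PySem.Dict.getD_empty k 0), pvPtr_zero]
    rfl
  · rcases hsafe c (List.mem_range.mpr hc) with hs | hs
    · left
      have := pvZ_le board c
      omega
    · right
      exact hs.2
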